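-- pv_equiv track=rewrite | github.com/AbolfazlAdhami/Algorithms-Data-Structures | Python/Dynamic_Programing/elder_age.py | elder_age_dp
-- ===== SOURCE A (Python) =====
-- def elder_age_dp(m, n, l, t):
--     dp = [[0] * (n + 1) for _ in range(m + 1)]
--     for r in range(1, m + 1):
--         for c in range(1, n + 1):
--             xor_value = (r - 1) ^ (c - 1)
--             contribution = max(0, xor_value - l)
--             dp[r][c] = (dp[r - 1][c] + dp[r][c - 1] -
--                         dp[r - 1][c - 1] + contribution) % t
--     return dp[m][n]
-- ===== SOURCE B (Python) =====
-- # Divide-and-conquer over power-of-two XOR blocks: closed-form triangle sums per block,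
-- # single final mod, instead of A's O(m*n) DP table.
--
-- def _tri(w, l):
--     # sum_{x=0}^{w-1} max(0, x - l)
--     if l >= w - 1:
--         return 0
--     if l < 0:
--         return w * (w - 1) // 2 - l * w
--     d = w - 1 - l
--     return d * (d + 1) // 2
--
-- def _xor_sum(m, n, l):
--     # sum of max(0, (i ^ j) - l) over 0 <= i < m, 0 <= j < n
--     if m <= 0 or n <= 0:
--         return 0
--     if m < n:
--         m, n = n, m
--     if m == 1:
--         return max(0, -l)
--     k = 1 << (m.bit_length() - 1)  # k <= m < 2k
--     n1 = min(n, k)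
--     n2 = n - n1
--     return (n1 * _tri(k, l) + n2 * _tri(k, l - k)
--             + _xor_sum(m - k, n1, l - k)
--             + _xor_sum(m - k, n2, l))
--
-- def elder_age_dp(m, n, l, t):
--     return _xor_sum(m, n, l) % t
-- ===== Notes on version B (the rewrite author's own statement) =====
-- stated objective: faster
-- what changed: Replaces the O(m*n) DP table (inclusion-exclusion prefix sums with a mod per cell) by a divide-and-conquer on power-of-two XOR blocks with closed-form triangle sums and a single final mod.
-- outside the precondition, e.g. on elder_age_dp(0, 3, 1, 0): A returns 0, B raises ZeroDivisionError
import Mathlib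
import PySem

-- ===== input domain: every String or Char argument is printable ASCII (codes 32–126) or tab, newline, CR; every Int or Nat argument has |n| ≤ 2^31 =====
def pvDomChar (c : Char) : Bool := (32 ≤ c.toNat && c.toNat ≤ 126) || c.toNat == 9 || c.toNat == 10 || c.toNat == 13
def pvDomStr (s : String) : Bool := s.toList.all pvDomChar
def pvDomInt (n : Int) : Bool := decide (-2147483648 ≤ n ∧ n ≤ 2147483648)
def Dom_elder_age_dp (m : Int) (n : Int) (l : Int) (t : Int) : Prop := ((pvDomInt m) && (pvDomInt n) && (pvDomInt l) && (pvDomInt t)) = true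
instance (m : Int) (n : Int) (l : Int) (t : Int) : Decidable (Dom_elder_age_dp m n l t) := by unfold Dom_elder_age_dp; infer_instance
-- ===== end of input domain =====

-- B replaces A's O(m*n) DP table by an O(log^2) divide-and-conquer over power-of-two XOR
-- blocks (closed-form triangle sums per block, one final mod): objective = faster (asymptotic).


-- ===== PORT A =====
def elder_age_dp (m : Int) (n : Int) (l : Int) (t : Int) : Int :=
  -- dp = [[0] * (n + 1) for _ in range(m + 1)]
  let dp : List (List Int) :=
    List.replicate (m + 1).toNat (List.replicate (n + 1).toNat (0 : Int))
  -- the two nested for-loops; indexing/assignment via pyGetD/pySetD (exact here: under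
  -- Pre_ every index r, c, r-1, c-1, m, n is nonnegative and in range)
  let dp := (PySem.List.pyRange 1 (m + 1) 1).foldl (fun dp r =>
    (PySem.List.pyRange 1 (n + 1) 1).foldl (fun dp c =>
      let xor_value := PySem.Int.bxor (r - 1) (c - 1)
      let contribution := max 0 (xor_value - l)
      let v := PySem.Int.mod
        (PySem.List.pyGetD (PySem.List.pyGetD dp (r - 1) []) c 0
          + PySem.List.pyGetD (PySem.List.pyGetD dp r []) (c - 1) 0
          - PySem.List.pyGetD (PySem.List.pyGetD dp (r - 1) []) (c - 1) 0
          + contribution) t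
      PySem.List.pySetD dp r (PySem.List.pySetD (PySem.List.pyGetD dp r []) c v)) dp) dp
  PySem.List.pyGetD (PySem.List.pyGetD dp m []) n 0

-- ===== PORT B =====
def triAlt (w : Int) (l : Int) : Int :=
  if w - 1 ≤ l then 0
  else if l < 0 then PySem.Int.floordiv (w * (w - 1)) 2 - l * w
  else
    let d := w - 1 - l
    PySem.Int.floordiv (d * (d + 1)) 2

-- fuel = m.toNat + n.toNat makes the recursion structural (a totality device only:
-- the fuel is never exhausted, see xorSumAltGo_eq); the algorithm is Source B's _xor_sum.
def xorSumAltGo : Nat → Int → Int → Int → Int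
  | 0, _, _, _ => 0
  | fuel + 1, m, n, l =>
    if m ≤ 0 ∨ n ≤ 0 then 0
    else
      let mm := if m < n then n else m   -- m, n = max, min  (the tuple swap)
      let nn := if m < n then m else n
      if mm = 1 then max 0 (-l)
      else
        let k : Int := (1 : Int) <<< (PySem.Int.bitLength mm - 1)
        let n1 := min nn k
        let n2 := nn - n1
        n1 * triAlt k l + n2 * triAlt k (l - k)
          + xorSumAltGo fuel (mm - k) n1 (l - k) + xorSumAltGo fuel (mm - k) n2 l

def xorSumAlt (m : Int) (n : Int) (l : Int) : Int := xorSumAltGo (m.toNat + n.toNat) m n l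

def elder_age_dp_alt (m : Int) (n : Int) (l : Int) (t : Int) : Int :=
  PySem.Int.mod (xorSumAlt m n l) t

-- ===== PRECONDITION & SPEC =====
-- Pre_ excludes: m < 0 or n < 0 (A raises IndexError on its empty table) and t = 0
-- (A raises ZeroDivisionError whenever both loops run; when m = 0 or n = 0 and t = 0
-- A still returns 0, but B's own final '% t' raises there — excluded, see cites).
def Pre_elder_age_dp (m : Int) (n : Int) (l : Int) (t : Int) : Prop :=
  0 ≤ m ∧ 0 ≤ n ∧ t ≠ 0
instance (m : Int) (n : Int) (l : Int) (t : Int) : Decidable (Pre_elder_age_dp m n l t) := by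
  unfold Pre_elder_age_dp; infer_instance

def pvWitness_elder_age_dp : Int × Int × Int × Int := (5, 7, 3, 100)

def Spec_elder_age_dp (m : Int) (n : Int) (l : Int) (t : Int) (out : Int) : Prop := out = elder_age_dp_alt m n l t
instance (m : Int) (n : Int) (l : Int) (t : Int) (out : Int) : Decidable (Spec_elder_age_dp m n l t out) := by unfold Spec_elder_age_dp; infer_instance

-- ===== CLAIM (what is proved, stated in full; the proofs are below) =====
def Claim_equal_elder_age_dp : Prop := ∀ (m : Int) (n : Int) (l : Int) (t : Int), Dom_elder_age_dp m n l t → Pre_elder_age_dp m n l t → Spec_elder_age_dp m n l t (elder_age_dp m n l t)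

-- ===== LEMMAS AND PROOFS =====

-- The mathematical value both programs compute (mod t): the grid sum of max(0, (i^j) - l).
def fXor (l : Int) (i j : Nat) : Int := max 0 (((i ^^^ j : Nat) : Int) - l)
def SX (M N : Nat) (l : Int) : Int := ∑ i ∈ Finset.range M, ∑ j ∈ Finset.range N, fXor l i j

lemma pymod_zero_left (t : Int) : PySem.Int.mod 0 t = 0 := by
  simp [PySem.Int.mod]

lemma pymod_sub_dvd (a t : Int) : t ∣ (PySem.Int.mod a t - a) := by
  have h := PySem.Int.floordiv_mul_add_mod a t
  exact ⟨-(PySem.Int.floordiv a t), by linarith⟩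

lemma pymod_congr {a b t : Int} (h : t ∣ (a - b)) : PySem.Int.mod a t = PySem.Int.mod b t := by
  rcases eq_or_ne t 0 with rfl | ht
  · obtain rfl : a = b := by have := Int.zero_dvd.mp h; omega
    rfl
  · have hd : t ∣ (PySem.Int.mod a t - PySem.Int.mod b t) := by
      have h1 := pymod_sub_dvd a t
      have h2 := pymod_sub_dvd b t
      have e : PySem.Int.mod a t - PySem.Int.mod b t
          = (PySem.Int.mod a t - a) - (PySem.Int.mod b t - b) + (a - b) := by ring
      rw [e]; exact dvd_add (dvd_sub h1 h2) h
    have habs : |PySem.Int.mod a t - PySem.Int.mod b t| < |t| := by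
      rcases lt_or_gt_of_ne ht with hneg | hpos
      · have b1 := PySem.Int.mod_neg_bounds a hneg
        have b2 := PySem.Int.mod_neg_bounds b hneg
        rw [abs_of_neg hneg, abs_lt]; omega
      · have b1 := PySem.Int.mod_nonneg a hpos
        have b2 := PySem.Int.mod_nonneg b hpos
        have c1 := PySem.Int.mod_lt a hpos
        have c2 := PySem.Int.mod_lt b hpos
        rw [abs_of_pos hpos, abs_lt]; omega
    have := Int.eq_zero_of_abs_lt_dvd ((abs_dvd t _).mpr hd) habs
    omega

lemma SX_comm (M N : Nat) (l : Int) : SX M N l = SX N M l := by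
  unfold SX
  rw [Finset.sum_comm]
  apply Finset.sum_congr rfl; intro j _
  apply Finset.sum_congr rfl; intro i _
  unfold fXor
  rw [Nat.xor_comm]

lemma floordiv_two_double (s : Int) : PySem.Int.floordiv (2 * s) 2 = s := by
  rw [PySem.Int.floordiv_eq_iff_of_pos (by norm_num)]; omega

lemma gauss (W : Nat) (l : Int) : (∑ x ∈ Finset.range W, ((x : Int) - l)) * 2 = (W : Int) * (W - 1) - 2 * l * W := by
  induction W with
  | zero => simp
  | succ W ih => rw [Finset.sum_range_succ]; push_cast; push_cast at ih; ring_nf; ring_nf at ih; linarith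

lemma tri_eq (W : Nat) (l : Int) :
    (∑ x ∈ Finset.range W, max 0 ((x : Int) - l)) = triAlt (W : Int) l := by
  unfold triAlt
  split_ifs with h1 h2
  · -- all terms zero: x ≤ W - 1 ≤ l
    apply Finset.sum_eq_zero
    intro x hx
    simp only [Finset.mem_range] at hx
    have : (x : Int) ≤ l := by omega
    omega
  · -- l < 0 : every term is x - l
    have he : ∀ x ∈ Finset.range W, max 0 ((x : Int) - l) = (x : Int) - l := by
      intro x _; have : (0:Int) ≤ (x:Int) := by positivity
      omega
    rw [Finset.sum_congr rfl he]
    have hg := gauss W l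
    have : (W : Int) * ((W : Int) - 1) = 2 * ((∑ x ∈ Finset.range W, ((x : Int) - l)) + l * W) := by ring_nf; ring_nf at hg; linarith
    rw [this, floordiv_two_double]; ring
  · -- 0 ≤ l < W - 1
    have hlW : l + 1 < W := by omega
    have hd : W = (l.toNat + 1) + (W - l.toNat - 1) := by omega
    set d : Nat := W - l.toNat - 1 with hdd
    rw [hd, Finset.sum_range_add]
    have hz : ∑ x ∈ Finset.range (l.toNat + 1), max 0 ((x : Int) - l) = 0 := by
      apply Finset.sum_eq_zero
      intro x hx
      simp only [Finset.mem_range] at hx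
      have : (x : Int) ≤ l := by omega
      omega
    have hp : ∀ y ∈ Finset.range d, max 0 (((l.toNat + 1 + y : Nat) : Int) - l) = ((y : Int) - (-1)) := by
      intro y _
      have h0 : ((l.toNat + 1 + y : Nat) : Int) - l = (y : Int) + 1 := by push_cast; omega
      rw [h0]; have : (0:Int) ≤ (y:Int) := by positivity
      omega
    rw [hz, Finset.sum_congr rfl hp]
    have hg := gauss d (-1)
    have hcast : ((l.toNat + 1 + d : Nat) : Int) - 1 - l = (d : Int) := by push_cast; omega
    simp only [hcast]
    have he : (d : Int) * ((d : Int) + 1) = 2 * (∑ y ∈ Finset.range d, ((y : Int) - (-1))) := by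
      ring_nf; ring_nf at hg; linarith
    rw [he, floordiv_two_double]; ring

lemma two_pow_add_eq_xor (e x : Nat) (h : x < 2 ^ e) : 2 ^ e + x = 2 ^ e ^^^ x := by
  apply Nat.eq_of_testBit_eq
  intro j
  rcases lt_trichotomy j e with hj | rfl | hj
  · rw [Nat.testBit_two_pow_add_gt hj, Nat.testBit_xor,
      Nat.testBit_two_pow_of_ne (by omega : e ≠ j)]
    simp
  · rw [Nat.testBit_two_pow_add_eq, Nat.testBit_xor, Nat.testBit_two_pow_self]
    simp
  · have he1 : 2 ^ e + x < 2 ^ j := by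
      calc 2 ^ e + x < 2 ^ e + 2 ^ e := by omega
      _ = 2 ^ (e + 1) := by ring
      _ ≤ 2 ^ j := Nat.pow_le_pow_right (by norm_num) (by omega)
    rw [Nat.testBit_eq_false_of_lt he1, Nat.testBit_xor,
      Nat.testBit_two_pow_of_ne (by omega : e ≠ j),
      Nat.testBit_eq_false_of_lt (lt_of_lt_of_le h (Nat.pow_le_pow_right (by norm_num) (by omega)))]
    rfl

lemma highbit_xor (e x y : Nat) (hx : x < 2 ^ e) (hy : y < 2 ^ e) :
    (2 ^ e + x) ^^^ y = 2 ^ e + (x ^^^ y) := by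
  rw [two_pow_add_eq_xor e x hx, two_pow_add_eq_xor e (x ^^^ y) (Nat.xor_lt_two_pow hx hy),
    Nat.xor_assoc]

lemma both_high_xor (e x y : Nat) (hx : x < 2 ^ e) (hy : y < 2 ^ e) :
    (2 ^ e + x) ^^^ (2 ^ e + y) = x ^^^ y := by
  rw [two_pow_add_eq_xor e x hx, two_pow_add_eq_xor e y hy]
  simp [Nat.xor_comm, Nat.xor_left_comm]

lemma sum_xor_reindex (e j : Nat) (hj : j < 2 ^ e) (g : Nat → Int) :
    ∑ i ∈ Finset.range (2 ^ e), g (i ^^^ j) = ∑ x ∈ Finset.range (2 ^ e), g x := by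
  apply Finset.sum_nbij' (i := fun x => x ^^^ j) (j := fun x => x ^^^ j)
  · intro a ha; simp only [Finset.mem_range] at *; exact Nat.xor_lt_two_pow ha hj
  · intro a ha; simp only [Finset.mem_range] at *; exact Nat.xor_lt_two_pow ha hj
  · intro a _; exact Nat.xor_xor_cancel_right _ _
  · intro a _; exact Nat.xor_xor_cancel_right _ _
  · intro a _; rfl

-- single full-power-of-two row block, columns shifted by 2^e when hi = true
lemma block_full (e N : Nat) (l : Int) (hN : N ≤ 2 ^ e) :
    ∑ i ∈ Finset.range (2 ^ e), ∑ j ∈ Finset.range N, fXor l i j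
      = (N : Int) * triAlt ((2 ^ e : Nat) : Int) l := by
  rw [Finset.sum_comm]
  have hx : ∀ j ∈ Finset.range N, ∑ i ∈ Finset.range (2 ^ e), fXor l i j
      = triAlt ((2 ^ e : Nat) : Int) l := by
    intro j hj
    simp only [Finset.mem_range] at hj
    have := sum_xor_reindex e j (by omega) (fun x => max 0 ((x : Int) - l))
    unfold fXor
    rw [this, tri_eq]
  rw [Finset.sum_congr rfl hx, Finset.sum_const, nsmul_eq_mul, Finset.card_range]

lemma block_full_hi (e N : Nat) (l : Int) (hN : N ≤ 2 ^ e) :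
    ∑ i ∈ Finset.range (2 ^ e), ∑ j ∈ Finset.range N, fXor l i (2 ^ e + j)
      = (N : Int) * triAlt ((2 ^ e : Nat) : Int) (l - ((2 ^ e : Nat) : Int)) := by
  have key : ∀ i ∈ Finset.range (2 ^ e), ∀ j ∈ Finset.range N,
      fXor l i (2 ^ e + j) = fXor (l - ((2 ^ e : Nat) : Int)) i j := by
    intro i hi j hj
    simp only [Finset.mem_range] at hi hj
    unfold fXor
    rw [Nat.xor_comm i, highbit_xor e j i (by omega) hi, Nat.xor_comm j i]
    push_cast
    omega
  calc ∑ i ∈ Finset.range (2 ^ e), ∑ j ∈ Finset.range N, fXor l i (2 ^ e + j)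
      = ∑ i ∈ Finset.range (2 ^ e), ∑ j ∈ Finset.range N, fXor (l - ((2 ^ e : Nat) : Int)) i j := by
        apply Finset.sum_congr rfl; intro i hi; exact Finset.sum_congr rfl (key i hi)
    _ = (N : Int) * triAlt ((2 ^ e : Nat) : Int) (l - ((2 ^ e : Nat) : Int)) :=
        block_full e N _ hN

lemma SX_split (e M N : Nat) (l : Int)
    (hM1 : 2 ^ e ≤ M) (hM2 : M < 2 ^ (e + 1)) (hN : N ≤ M) :
    SX M N l
      = ((min N (2 ^ e) : Nat) : Int) * triAlt ((2 ^ e : Nat) : Int) l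
        + ((N - min N (2 ^ e) : Nat) : Int) * triAlt ((2 ^ e : Nat) : Int) (l - ((2 ^ e : Nat) : Int))
        + SX (M - 2 ^ e) (min N (2 ^ e)) (l - ((2 ^ e : Nat) : Int))
        + SX (M - 2 ^ e) (N - min N (2 ^ e)) l := by
  have hpow : 2 ^ (e + 1) = 2 ^ e + 2 ^ e := by ring
  obtain ⟨D, rfl⟩ : ∃ D, M = 2 ^ e + D := ⟨M - 2 ^ e, by omega⟩
  simp only [Nat.add_sub_cancel_left]
  have hMK : D < 2 ^ e := by omega
  have hrow : SX (2 ^ e + D) N l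
      = (∑ i ∈ Finset.range (2 ^ e), ∑ j ∈ Finset.range N, fXor l i j)
        + ∑ i ∈ Finset.range D, ∑ j ∈ Finset.range N, fXor l (2 ^ e + i) j := by
    unfold SX
    rw [Finset.sum_range_add]
  by_cases hNK : N ≤ 2 ^ e
  · rw [hrow]
    rw [show min N (2 ^ e) = N by omega, show N - N = 0 by omega]
    have h21 : ∑ i ∈ Finset.range D, ∑ j ∈ Finset.range N, fXor l (2 ^ e + i) j
        = SX D N (l - ((2 ^ e : Nat) : Int)) := by
      unfold SX
      apply Finset.sum_congr rfl; intro i hi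
      apply Finset.sum_congr rfl; intro j hj
      simp only [Finset.mem_range] at hi hj
      unfold fXor
      rw [highbit_xor e i j (by omega) (by omega)]
      push_cast; omega
    rw [h21, block_full e N l hNK]
    unfold SX
    simp
  · replace hNK : 2 ^ e < N := by omega
    rw [show min N (2 ^ e) = 2 ^ e by omega]
    obtain ⟨C, rfl⟩ : ∃ C, N = 2 ^ e + C := ⟨N - 2 ^ e, by omega⟩
    simp only [Nat.add_sub_cancel_left]
    have hC : C < 2 ^ e := by omega
    have hcol : ∀ (F : Nat → Nat → Int) (R : Nat),
        (∑ i ∈ Finset.range R, ∑ j ∈ Finset.range (2 ^ e + C), F i j)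
        = (∑ i ∈ Finset.range R, ∑ j ∈ Finset.range (2 ^ e), F i j)
          + ∑ i ∈ Finset.range R, ∑ j ∈ Finset.range C, F i (2 ^ e + j) := by
      intro F R
      rw [← Finset.sum_add_distrib]
      apply Finset.sum_congr rfl; intro i _
      rw [Finset.sum_range_add]
    rw [hrow, hcol, hcol]
    have t11 := block_full e (2 ^ e) l le_rfl
    have t12 := block_full_hi e C l (by omega)
    have t21 : ∑ i ∈ Finset.range D, ∑ j ∈ Finset.range (2 ^ e), fXor l (2 ^ e + i) j
        = SX D (2 ^ e) (l - ((2 ^ e : Nat) : Int)) := by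
      unfold SX
      apply Finset.sum_congr rfl; intro i hi
      apply Finset.sum_congr rfl; intro j hj
      simp only [Finset.mem_range] at hi hj
      unfold fXor
      rw [highbit_xor e i j (by omega) (by omega)]
      push_cast; omega
    have t22 : ∑ i ∈ Finset.range D, ∑ j ∈ Finset.range C, fXor l (2 ^ e + i) (2 ^ e + j)
        = SX D C l := by
      unfold SX
      apply Finset.sum_congr rfl; intro i hi
      apply Finset.sum_congr rfl; intro j hj
      simp only [Finset.mem_range] at hi hj
      unfold fXor
      rw [both_high_xor e i j (by omega) (by omega)]
    rw [t11, t12, t21, t22]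
    ring


lemma SX_zero_right (M : Nat) (l : Int) : SX M 0 l = 0 := by
  unfold SX; simp

lemma go_core (fuel : Nat)
    (IH : ∀ m n l : Int, 0 ≤ m → 0 ≤ n → m.toNat + n.toNat ≤ fuel →
      xorSumAltGo fuel m n l = SX m.toNat n.toNat l)
    (M N : Nat) (l : Int) (h1 : 1 ≤ N) (h2 : N ≤ M) (h3 : 2 ≤ M)
    (hf : M + N ≤ fuel + 1) :
    min (N : Int) ((1 : Int) <<< (PySem.Int.bitLength (M : Int) - 1))
        * triAlt ((1 : Int) <<< (PySem.Int.bitLength (M : Int) - 1)) l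
      + ((N : Int) - min (N : Int) ((1 : Int) <<< (PySem.Int.bitLength (M : Int) - 1)))
        * triAlt ((1 : Int) <<< (PySem.Int.bitLength (M : Int) - 1))
          (l - (1 : Int) <<< (PySem.Int.bitLength (M : Int) - 1))
      + xorSumAltGo fuel ((M : Int) - (1 : Int) <<< (PySem.Int.bitLength (M : Int) - 1))
          (min (N : Int) ((1 : Int) <<< (PySem.Int.bitLength (M : Int) - 1)))
          (l - (1 : Int) <<< (PySem.Int.bitLength (M : Int) - 1))
      + xorSumAltGo fuel ((M : Int) - (1 : Int) <<< (PySem.Int.bitLength (M : Int) - 1))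
          ((N : Int) - min (N : Int) ((1 : Int) <<< (PySem.Int.bitLength (M : Int) - 1))) l
      = SX M N l := by
  set e : Nat := PySem.Int.bitLength (M : Int) - 1 with he
  have hbl : 1 ≤ PySem.Int.bitLength (M : Int) := by
    by_contra hb
    have h0 := PySem.Int.lt_two_pow_bitLength (M : Int)
    have hb0 : PySem.Int.bitLength (M : Int) = 0 := by omega
    rw [hb0] at h0
    simp at h0
    omega
  have hna : ((M : Int)).natAbs = M := by omega
  have hk1 : (2 : Nat) ^ e ≤ M := by
    have h := PySem.Int.two_pow_bitLength_le (M : Int) (by exact_mod_cast (by omega : (M:Int) ≠ 0))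
    rw [← he, hna] at h
    exact h
  have hk2 : M < 2 ^ (e + 1) := by
    have h := PySem.Int.lt_two_pow_bitLength (M : Int)
    rw [show PySem.Int.bitLength (M : Int) = e + 1 by omega, hna] at h
    exact h
  have h2e1 : (1 : Nat) ≤ 2 ^ e := Nat.one_le_two_pow
  have hkk : ((1 : Int) <<< e) = ((2 ^ e : Nat) : Int) := by
    rw [Int.shiftLeft_eq, one_mul]; push_cast; ring
  rw [hkk]
  have e1 : min (N : Int) ((2 ^ e : Nat) : Int) = ((min N (2 ^ e) : Nat) : Int) :=
    (Nat.cast_min _ _).symm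
  have e2 : (N : Int) - ((min N (2 ^ e) : Nat) : Int) = ((N - min N (2 ^ e) : Nat) : Int) :=
    (Nat.cast_sub (Nat.min_le_left _ _)).symm
  have e3 : (M : Int) - ((2 ^ e : Nat) : Int) = ((M - 2 ^ e : Nat) : Int) :=
    (Nat.cast_sub hk1).symm
  rw [e1, e2, e3]
  rw [IH ((M - 2 ^ e : Nat) : Int) ((min N (2 ^ e) : Nat) : Int) (l - ((2 ^ e : Nat) : Int))
        (by positivity) (by positivity) (by simp only [Int.toNat_natCast]; omega),
      IH ((M - 2 ^ e : Nat) : Int) ((N - min N (2 ^ e) : Nat) : Int) l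
        (by positivity) (by positivity) (by simp only [Int.toNat_natCast]; omega)]
  simp only [Int.toNat_natCast]
  rw [SX_split e M N l hk1 hk2 h2]

theorem xorSumAltGo_eq (fuel : Nat) : ∀ (m n l : Int), 0 ≤ m → 0 ≤ n →
    m.toNat + n.toNat ≤ fuel → xorSumAltGo fuel m n l = SX m.toNat n.toNat l := by
  induction fuel with
  | zero =>
    intro m n l hm hn hf
    have h0 : m.toNat = 0 := by omega
    simp only [xorSumAltGo]
    rw [h0]
    unfold SX; simp
  | succ fuel IH =>
    intro m n l hm hn hf
    simp only [xorSumAltGo]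
    by_cases h0 : m ≤ 0 ∨ n ≤ 0
    · rw [if_pos h0]
      rcases h0 with h | h
      · rw [show m.toNat = 0 by omega]; unfold SX; simp
      · rw [show n.toNat = 0 by omega, SX_zero_right]
    · rw [if_neg h0]
      by_cases hmn : m < n
      · simp only [if_pos hmn]
        by_cases h1 : n = 1
        · exfalso; omega
        · rw [if_neg h1]
          obtain ⟨M, hM⟩ : ∃ M : Nat, n = (M : Int) := ⟨n.toNat, by omega⟩
          obtain ⟨N, hN⟩ : ∃ N : Nat, m = (N : Int) := ⟨m.toNat, by omega⟩
          subst hM; subst hN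
          have hc := go_core fuel IH M N l (by omega) (by omega) (by omega) (by omega)
          simp only [Int.toNat_natCast]
          exact hc.trans (SX_comm M N l)
      · simp only [if_neg hmn]
        by_cases h1 : m = 1
        · rw [if_pos h1]
          have hn1 : n = 1 := by omega
          subst h1; subst hn1
          unfold SX fXor
          norm_num
        · rw [if_neg h1]
          obtain ⟨M, hM⟩ : ∃ M : Nat, m = (M : Int) := ⟨m.toNat, by omega⟩
          obtain ⟨N, hN⟩ : ∃ N : Nat, n = (N : Int) := ⟨n.toNat, by omega⟩
          subst hM; subst hN
          have hc := go_core fuel IH M N l (by omega) (by omega) (by omega) (by omega)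
          simp only [Int.toNat_natCast]
          exact hc

-- ---- A-side table description ----
def gCell (l t : Int) (r c : Nat) : Int := PySem.Int.mod (SX r c l) t

def rowDone (l t : Int) (N r : Nat) : List Int :=
  (List.range (N + 1)).map (fun c => gCell l t r c)

def rowPart (l t : Int) (N r c0 : Nat) : List Int :=
  (List.range (N + 1)).map (fun c => if c ≤ c0 then gCell l t r c else 0)

def tabDone (l t : Int) (M N r0 : Nat) : List (List Int) :=
  (List.range (M + 1)).map (fun r =>
    if r ≤ r0 then rowDone l t N r else List.replicate (N + 1) (0 : Int))

def tabMid (l t : Int) (M N r0 c0 : Nat) : List (List Int) :=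
  (List.range (M + 1)).map (fun r =>
    if r ≤ r0 then rowDone l t N r
    else if r = r0 + 1 then rowPart l t N r c0
    else List.replicate (N + 1) (0 : Int))

lemma SX_zero_rowz (c : Nat) (l : Int) : SX 0 c l = 0 := by unfold SX; simp
lemma SX_zero_colz (r : Nat) (l : Int) : SX r 0 l = 0 := by unfold SX; simp

lemma gCell_zero_row (l t : Int) (c : Nat) : gCell l t 0 c = 0 := by
  unfold gCell; rw [SX_zero_rowz, pymod_zero_left]
lemma gCell_zero_col (l t : Int) (r : Nat) : gCell l t r 0 = 0 := by
  unfold gCell; rw [SX_zero_colz, pymod_zero_left]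

lemma SX_succ_succ (r c : Nat) (l : Int) :
    SX (r + 1) (c + 1) l = SX r (c + 1) l + SX (r + 1) c l - SX r c l + fXor l r c := by
  unfold SX
  rw [Finset.sum_range_succ (f := fun i => ∑ j ∈ Finset.range (c + 1), fXor l i j),
      Finset.sum_range_succ (f := fun i => ∑ j ∈ Finset.range c, fXor l i j),
      Finset.sum_range_succ (f := fun j => fXor l r j)]
  ring

lemma gCell_step (l t : Int) (r c : Nat) :
    PySem.Int.mod (gCell l t r (c + 1) + gCell l t (r + 1) c - gCell l t r c + fXor l r c) t
      = gCell l t (r + 1) (c + 1) := by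
  unfold gCell
  apply pymod_congr
  have h := SX_succ_succ r c l
  have d1 := pymod_sub_dvd (SX r (c + 1) l) t
  have d2 := pymod_sub_dvd (SX (r + 1) c l) t
  have d3 := pymod_sub_dvd (SX r c l) t
  have e : (PySem.Int.mod (SX r (c+1) l) t + PySem.Int.mod (SX (r+1) c l) t
      - PySem.Int.mod (SX r c l) t + fXor l r c) - SX (r+1) (c+1) l
      = (PySem.Int.mod (SX r (c+1) l) t - SX r (c+1) l)
        + (PySem.Int.mod (SX (r+1) c l) t - SX (r+1) c l)
        - (PySem.Int.mod (SX r c l) t - SX r c l) := by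
    rw [h]; ring
  rw [e]
  exact dvd_sub (dvd_add d1 d2) d3

lemma set_map_range {α : Type} (f : Nat → α) (n i : Nat) (v : α) :
    ((List.range n).map f).set i v
      = (List.range n).map (fun j => if j = i then v else f j) := by
  apply List.ext_getElem (by simp)
  intro k h1 h2
  simp only [List.getElem_set, List.getElem_map, List.getElem_range]
  by_cases h : i = k <;> simp [h, Ne.symm]

-- generic loop-invariant induction for 'for v in range(1, X+1)'
lemma foldl_pyRange_inv {α : Type} (f : α → Int → α) (g : Nat → α) (X : Nat)
    (hstep : ∀ j : Nat, j < X → f (g j) ((j : Int) + 1) = g (j + 1)) :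
    (PySem.List.pyRange 1 ((X : Int) + 1) 1).foldl f (g 0) = g X := by
  induction X with
  | zero => rw [PySem.List.pyRange_one_eq_nil (by norm_num)]; rfl
  | succ X ih =>
    have hc : ((X : Int) + 1 + 1) = (((X + 1) : Nat) : Int) + 1 := by push_cast; ring
    rw [show (((X + 1) : Nat) : Int) + 1 = ((X : Int) + 1) + 1 by push_cast; ring]
    rw [PySem.List.pyRange_one_succ_right (by omega), List.foldl_append]
    rw [ih (fun j hj => hstep j (by omega))]
    simpa using hstep X (by omega)

lemma rowDone_get (l t : Int) (N r c : Nat) (hc : c < N + 1) :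
    PySem.List.pyGetD (rowDone l t N r) ((c : Nat) : Int) 0 = gCell l t r c := by
  rw [PySem.List.pyGetD_natCast]
  unfold rowDone
  rw [PySem.List.getD_map_range _ _ _ _ hc]

lemma rowPart_get (l t : Int) (N r c0 c : Nat) (hc : c < N + 1) :
    PySem.List.pyGetD (rowPart l t N r c0) ((c : Nat) : Int) 0
      = if c ≤ c0 then gCell l t r c else 0 := by
  rw [PySem.List.pyGetD_natCast]
  unfold rowPart
  rw [PySem.List.getD_map_range _ _ _ _ hc]

lemma tab_get_done (l t : Int) (M N r0 c0 r : Nat) (hrr : r ≤ r0) (hrM : r < M + 1) :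
    PySem.List.pyGetD (tabMid l t M N r0 c0) ((r : Nat) : Int) [] = rowDone l t N r := by
  rw [PySem.List.pyGetD_natCast]
  unfold tabMid
  rw [PySem.List.getD_map_range _ _ _ _ hrM, if_pos hrr]

lemma tab_get_cur (l t : Int) (M N r0 c0 : Nat) (hrM : r0 + 1 < M + 1) :
    PySem.List.pyGetD (tabMid l t M N r0 c0) (((r0 + 1 : Nat)) : Int) [] = rowPart l t N (r0 + 1) c0 := by
  rw [PySem.List.pyGetD_natCast]
  unfold tabMid
  rw [PySem.List.getD_map_range _ _ _ _ hrM, if_neg (by omega), if_pos rfl]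

lemma rowPart_set (l t : Int) (N r c0 : Nat) (v : Int) :
    PySem.List.pySetD (rowPart l t N r c0) (((c0 + 1 : Nat)) : Int) v
      = (List.range (N + 1)).map (fun c => if c = c0 + 1 then v else if c ≤ c0 then gCell l t r c else 0) := by
  rw [PySem.List.pySetD_natCast]
  unfold rowPart
  rw [set_map_range]

lemma inner_step (l t : Int) (M N r0 c0 : Nat) (hr : r0 < M) (hc : c0 < N) :
    (fun (dp : List (List Int)) (c : Int) =>
      let xor_value := PySem.Int.bxor (((r0 : Int) + 1) - 1) (c - 1)
      let contribution := max 0 (xor_value - l)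
      let v := PySem.Int.mod
        (PySem.List.pyGetD (PySem.List.pyGetD dp (((r0 : Int) + 1) - 1) []) c 0
          + PySem.List.pyGetD (PySem.List.pyGetD dp ((r0 : Int) + 1) []) (c - 1) 0
          - PySem.List.pyGetD (PySem.List.pyGetD dp (((r0 : Int) + 1) - 1) []) (c - 1) 0
          + contribution) t
      PySem.List.pySetD dp ((r0 : Int) + 1) (PySem.List.pySetD (PySem.List.pyGetD dp ((r0 : Int) + 1) []) c v))
      (tabMid l t M N r0 c0) ((c0 : Int) + 1)
      = tabMid l t M N r0 (c0 + 1) := by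
  simp only
  have hi1 : ((r0 : Int) + 1 - 1) = ((r0 : Nat) : Int) := by ring
  have hi2 : ((c0 : Int) + 1 - 1) = ((c0 : Nat) : Int) := by ring
  have hi3 : ((r0 : Int) + 1) = (((r0 + 1 : Nat)) : Int) := by push_cast; ring
  have hi4 : ((c0 : Int) + 1) = (((c0 + 1 : Nat)) : Int) := by push_cast; ring
  rw [hi1, hi2, hi3, hi4]
  rw [tab_get_done l t M N r0 c0 r0 le_rfl (by omega)]
  rw [tab_get_cur l t M N r0 c0 (by omega)]
  rw [rowDone_get l t N r0 (c0 + 1) (by omega)]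
  rw [rowDone_get l t N r0 c0 (by omega)]
  rw [rowPart_get l t N (r0 + 1) c0 c0 (by omega), if_pos le_rfl]
  rw [PySem.Int.bxor_natCast]
  have hv : PySem.Int.mod
      (gCell l t r0 (c0 + 1) + gCell l t (r0 + 1) c0 - gCell l t r0 c0 + max 0 (((r0 ^^^ c0 : Nat) : Int) - l)) t
      = gCell l t (r0 + 1) (c0 + 1) := gCell_step l t r0 c0
  rw [hv]
  rw [rowPart_set l t N (r0 + 1) c0]
  have hrow : (List.range (N + 1)).map
      (fun c => if c = c0 + 1 then gCell l t (r0 + 1) (c0 + 1) else if c ≤ c0 then gCell l t (r0 + 1) c else 0)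
      = rowPart l t N (r0 + 1) (c0 + 1) := by
    unfold rowPart
    apply List.map_congr_left
    intro c _
    by_cases h : c = c0 + 1
    · subst h; simp
    · rw [if_neg h]
      by_cases h2 : c ≤ c0
      · rw [if_pos h2, if_pos (by omega)]
      · rw [if_neg h2, if_neg (by omega)]
  rw [hrow]
  rw [PySem.List.pySetD_natCast]
  unfold tabMid
  rw [set_map_range]
  apply List.map_congr_left
  intro r _
  by_cases h : r = r0 + 1
  · subst h; rw [if_pos rfl, if_neg (by omega), if_pos rfl]
  · rw [if_neg h]
    by_cases hle : r ≤ r0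
    · rw [if_pos hle, if_pos hle]
    · rw [if_neg hle, if_neg hle, if_neg h, if_neg h]

lemma rowPart_zero (l t : Int) (N r : Nat) :
    rowPart l t N r 0 = List.replicate (N + 1) (0 : Int) := by
  rw [List.eq_replicate_iff]
  constructor
  · simp [rowPart]
  · intro b hb
    unfold rowPart at hb
    obtain ⟨c, _, rfl⟩ := List.mem_map.mp hb
    by_cases h : c ≤ 0
    · rw [if_pos h, show c = 0 by omega, gCell_zero_col]
    · rw [if_neg h]

lemma rowPart_full (l t : Int) (N r : Nat) : rowPart l t N r N = rowDone l t N r := by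
  unfold rowPart rowDone
  apply List.map_congr_left
  intro c hcm
  simp only [List.mem_range] at hcm
  rw [if_pos (by omega)]

lemma tabMid_zero (l t : Int) (M N r0 : Nat) : tabMid l t M N r0 0 = tabDone l t M N r0 := by
  unfold tabMid tabDone
  apply List.map_congr_left
  intro r _
  by_cases h : r ≤ r0
  · rw [if_pos h, if_pos h]
  · rw [if_neg h, if_neg h]
    by_cases h2 : r = r0 + 1
    · rw [if_pos h2, rowPart_zero]
    · rw [if_neg h2]

lemma tabMid_full (l t : Int) (M N r0 : Nat) : tabMid l t M N r0 N = tabDone l t M N (r0 + 1) := by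
  unfold tabMid tabDone
  apply List.map_congr_left
  intro r _
  by_cases h : r ≤ r0
  · rw [if_pos h, if_pos (by omega)]
  · rw [if_neg h]
    by_cases h2 : r = r0 + 1
    · rw [if_pos h2, if_pos (by omega), h2, rowPart_full]
    · rw [if_neg h2, if_neg (by omega)]

lemma tabDone_init (l t : Int) (M N : Nat) :
    tabDone l t M N 0 = List.replicate (M + 1) (List.replicate (N + 1) (0 : Int)) := by
  rw [List.eq_replicate_iff]
  constructor
  · simp [tabDone]
  · intro b hb
    unfold tabDone at hb
    obtain ⟨r, _, rfl⟩ := List.mem_map.mp hb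
    by_cases h : r ≤ 0
    · rw [if_pos h, show r = 0 by omega]
      rw [List.eq_replicate_iff]
      refine ⟨by simp [rowDone], ?_⟩
      intro b hb2
      obtain ⟨c, _, rfl⟩ := List.mem_map.mp hb2
      exact gCell_zero_row l t c
    · rw [if_neg h]

theorem elder_age_dp_eq (m n l t : Int) (hm : 0 ≤ m) (hn : 0 ≤ n) :
    elder_age_dp m n l t = PySem.Int.mod (SX m.toNat n.toNat l) t := by
  obtain ⟨M, rfl⟩ : ∃ M : Nat, m = (M : Int) := ⟨m.toNat, by omega⟩
  obtain ⟨N, rfl⟩ : ∃ N : Nat, n = (N : Int) := ⟨n.toNat, by omega⟩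
  unfold elder_age_dp
  simp only [Int.toNat_natCast]
  have hTN : ((M : Int) + 1).toNat = M + 1 := by omega
  have hTN2 : ((N : Int) + 1).toNat = N + 1 := by omega
  rw [hTN, hTN2]
  have houter : (PySem.List.pyRange 1 ((M : Int) + 1) 1).foldl
      (fun dp r => (PySem.List.pyRange 1 ((N : Int) + 1) 1).foldl
        (fun dp c =>
          let xor_value := PySem.Int.bxor (r - 1) (c - 1)
          let contribution := max 0 (xor_value - l)
          let v := PySem.Int.mod
            (PySem.List.pyGetD (PySem.List.pyGetD dp (r - 1) []) c 0
              + PySem.List.pyGetD (PySem.List.pyGetD dp r []) (c - 1) 0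
              - PySem.List.pyGetD (PySem.List.pyGetD dp (r - 1) []) (c - 1) 0
              + contribution) t
          PySem.List.pySetD dp r (PySem.List.pySetD (PySem.List.pyGetD dp r []) c v)) dp)
      (List.replicate (M + 1) (List.replicate (N + 1) (0 : Int)))
      = tabDone l t M N M := by
    rw [← tabDone_init l t M N]
    apply foldl_pyRange_inv
      (g := fun r0 => tabDone l t M N r0)
    intro r0 hr0
    simp only
    rw [← tabMid_zero l t M N r0, ← tabMid_full l t M N r0]
    apply foldl_pyRange_inv (g := fun c0 => tabMid l t M N r0 c0)
    intro c0 hc0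
    exact inner_step l t M N r0 c0 hr0 hc0
  rw [houter]
  rw [show tabDone l t M N M = tabMid l t M N M 0 by rw [tabMid_zero]]
  rw [tab_get_done l t M N M 0 M le_rfl (by omega)]
  rw [rowDone_get l t N M N (by omega)]
  rfl

-- ===== VERDICT (by name: the statement is the Claim_ definition above) =====
theorem elder_age_dp_spec : Claim_equal_elder_age_dp := by
  intro m n l t _ hpre
  obtain ⟨hm, hn, ht⟩ := hpre
  show elder_age_dp m n l t = elder_age_dp_alt m n l t
  rw [elder_age_dp_eq m n l t hm hn]
  unfold elder_age_dp_alt xorSumAlt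
  rw [xorSumAltGo_eq _ m n l hm hn le_rfl]
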